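-- pv_equiv track=rewrite | github.com/viiievgeniiiv/Reed-Solomon-Code | Reed_Solomon.py | pravilo_slozenis
-- ===== SOURCE A (Python) =====
-- def pravilo_slozenis(i,q,stepeni_alfa):
--     flag = True
--     stepen_tek = []
--     b = []
--     if i < q:
--         stepen_tek.append(i)
--         return stepen_tek
--     elif i == q:
--         stepen_tek.append(0)
--         stepen_tek.append(1)
--         return stepen_tek
--     elif i > q:
--         for j in range(len(stepeni_alfa[-1])):
--             stepen = int(stepeni_alfa[-1][j]) + 1
--             if stepen == q:
--                 stepen_tek.append(0)
--                 stepen_tek.append(1)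
--                 flag = False
--             else:
--                 stepen_tek.append(stepen)
--         for j in stepen_tek:
--             if stepen_tek.count(j) % 2 != 0:
--                 b.append(j)
--         return sorted(b)
-- ===== SOURCE B (Python) =====
-- def pravilo_slozenis(i, q, stepeni_alfa):
--     if i < q:
--         return [i]
--     if i == q:
--         return [0, 1]
--     # i > q: build the degree list from the last row, then a single
--     # sort + grouped run scan replaces per-element .count plus a final sort.
--     stepen_tek = []
--     for x in stepeni_alfa[-1]:
--         s = int(x) + 1
--         if s == q:
--             stepen_tek += [0, 1]
--         else:
--             stepen_tek.append(s)
--     stepen_tek.sort()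
--     res = []
--     k = 0
--     n = len(stepen_tek)
--     while k < n:
--         v = stepen_tek[k]
--         m = k + 1
--         while m < n and stepen_tek[m] == v:
--             m += 1
--         if (m - k) % 2 == 1:
--             res += stepen_tek[k:m]
--         k = m
--     return res
-- ===== Notes on version B (the rewrite author's own statement) =====
-- stated objective: alternative
-- what changed: Replaces the quadratic per-element .count scan plus a terminal sorted() with one sort of stepen_tek followed by a single pass grouping equal adjacent values into runs, emitting each odd-length run whole (already in order).
import Mathlib
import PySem

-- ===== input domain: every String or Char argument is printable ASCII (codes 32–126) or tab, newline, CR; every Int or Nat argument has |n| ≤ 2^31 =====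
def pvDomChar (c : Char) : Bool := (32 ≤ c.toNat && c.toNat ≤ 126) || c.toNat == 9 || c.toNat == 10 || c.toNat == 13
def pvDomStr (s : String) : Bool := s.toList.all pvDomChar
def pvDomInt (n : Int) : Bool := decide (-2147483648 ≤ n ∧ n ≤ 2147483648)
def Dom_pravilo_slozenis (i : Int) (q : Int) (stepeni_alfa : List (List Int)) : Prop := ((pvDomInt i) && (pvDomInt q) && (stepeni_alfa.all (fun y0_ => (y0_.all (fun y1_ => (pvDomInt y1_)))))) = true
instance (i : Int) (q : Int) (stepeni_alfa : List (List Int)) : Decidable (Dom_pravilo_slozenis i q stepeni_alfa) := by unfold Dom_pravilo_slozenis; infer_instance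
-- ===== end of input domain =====

-- B replaces A's per-element .count pass plus terminal sorted() by one sort and a single
-- grouped run scan over it (odd-length runs emitted whole, already in order); same return value.

-- ===== PORT A =====
-- A's dead 'flag' variable is never read and is omitted.
def pravilo_slozenis (i : Int) (q : Int) (stepeni_alfa : List (List Int)) : List Int :=
  if i < q then [i]
  else if i = q then [0, 1]
  else
    let last := PySem.List.pyGetD stepeni_alfa (-1) []
    let stepen_tek := (PySem.List.pyRange 0 (last.length : Int) 1).foldl
      (fun st j =>
        let stepen := PySem.List.pyGetD last j 0 + 1
        if stepen = q then st ++ [0, 1] else st ++ [stepen]) []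
    let b := stepen_tek.foldl
      (fun b j => if PySem.List.count stepen_tek j % 2 ≠ 0 then b ++ [j] else b) []
    PySem.List.sorted b (fun x => x) false

-- ===== PORT B =====
-- B's outer while loop over runs of the sorted list, as structural recursion on the
-- remaining suffix; the inner while counting the run is takeWhile, k jumping to the
-- run's end is dropWhile
def pvRuns : List Int → List Int
  | [] => []
  | v :: xs =>
      let run := xs.takeWhile (· == v)
      let rest := pvRuns (xs.dropWhile (· == v))
      if (run.length + 1) % 2 = 1 then (v :: run) ++ rest else rest
  termination_by s => s.length
  decreasing_by
    simp only [List.length_cons]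
    exact Nat.lt_succ_of_le (List.length_dropWhile_le _ _)


def pravilo_slozenis_alt (i : Int) (q : Int) (stepeni_alfa : List (List Int)) : List Int :=
  if i < q then [i]
  else if i = q then [0, 1]
  else
    let last := PySem.List.pyGetD stepeni_alfa (-1) []
    let stepen_tek := last.foldl
      (fun st x =>
        let s := x + 1
        if s = q then st ++ [0, 1] else st ++ [s]) []
    pvRuns (PySem.List.sorted stepen_tek (fun x => x) false)


-- ===== PRECONDITION & SPEC =====
-- Pre_ excludes exactly the inputs where A raises IndexError (stepeni_alfa[-1] on an empty
-- list): i > q with stepeni_alfa = []; B raises there too.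
def Pre_pravilo_slozenis (i : Int) (q : Int) (stepeni_alfa : List (List Int)) : Prop :=
  q < i → stepeni_alfa ≠ []
instance (i : Int) (q : Int) (stepeni_alfa : List (List Int)) : Decidable (Pre_pravilo_slozenis i q stepeni_alfa) := by unfold Pre_pravilo_slozenis; infer_instance
def pvWitness_pravilo_slozenis : Int × Int × List (List Int) := (5, 3, [[2, 2, 0, 1]])
def Spec_pravilo_slozenis (i : Int) (q : Int) (stepeni_alfa : List (List Int)) (out : List Int) : Prop := out = pravilo_slozenis_alt i q stepeni_alfa
instance (i : Int) (q : Int) (stepeni_alfa : List (List Int)) (out : List Int) : Decidable (Spec_pravilo_slozenis i q stepeni_alfa out) := by unfold Spec_pravilo_slozenis; infer_instance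

-- ===== CLAIM (what is proved, stated in full; the proofs are below) =====
def Claim_equal_pravilo_slozenis : Prop := ∀ (i : Int) (q : Int) (stepeni_alfa : List (List Int)), Dom_pravilo_slozenis i q stepeni_alfa → Pre_pravilo_slozenis i q stepeni_alfa → Spec_pravilo_slozenis i q stepeni_alfa (pravilo_slozenis i q stepeni_alfa)

-- ===== LEMMAS AND PROOFS =====

theorem pvLt_of_mem_dropWhile (v : Int) (xs : List Int)
    (hle : ∀ y ∈ xs, v ≤ y) (hpw : xs.Pairwise (· ≤ ·)) :
    ∀ y ∈ xs.dropWhile (· == v), v < y := by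
  induction xs with
  | nil => simp
  | cons x xs ih =>
    by_cases hx : x = v
    · subst hx
      rw [List.dropWhile_cons_of_pos (by simp)]
      exact ih (fun y hy => hle y (.tail _ hy)) (List.Pairwise.of_cons hpw)
    · rw [List.dropWhile_cons_of_neg (by simp [hx])]
      intro y hy
      rcases List.mem_cons.1 hy with rfl | hy'
      · exact lt_of_le_of_ne (hle y (.head _)) (fun h => hx h.symm)
      · have hvx : v < x := lt_of_le_of_ne (hle x (.head _)) (fun h => hx h.symm)
        have hxy : x ≤ y := (List.pairwise_cons.1 hpw).1 y hy'
        omega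


-- on a ≤-sorted list, the run scan equals filtering by any predicate that agrees with
-- "multiplicity in s is odd" on members of s
theorem pvRuns_eq_filter_aux (p : Int → Bool) :
    ∀ (n : Nat) (s : List Int), s.length ≤ n → s.Pairwise (· ≤ ·) →
      (∀ x ∈ s, p x = decide (List.count x s % 2 ≠ 0)) →
      pvRuns s = s.filter p := by
  intro n
  induction n with
  | zero =>
    intro s hlen _ _
    have : s = [] := by cases s <;> simp_all
    simp [this, pvRuns]
  | succ n ih =>
    intro s hlen hs hp
    match s with
    | [] => simp [pvRuns]
    | v :: xs =>
      have hle : ∀ y ∈ xs, v ≤ y := (List.pairwise_cons.1 hs).1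
      have hxs_pw : xs.Pairwise (· ≤ ·) := (List.pairwise_cons.1 hs).2
      rw [pvRuns]
      set t := xs.takeWhile (· == v) with ht
      set d := xs.dropWhile (· == v) with hd
      have hrun_all : ∀ y ∈ t, y = v := by
        intro y hy
        rw [ht] at hy
        have := List.mem_takeWhile_imp hy
        simpa using this
      have hrun_rep : t = List.replicate t.length v := List.eq_replicate_of_mem hrun_all
      have hlt : ∀ y ∈ d, v < y := pvLt_of_mem_dropWhile v xs hle hxs_pw
      have hvnotin : v ∉ d := fun h => lt_irrefl v (hlt v h)
      have hxs_decomp : xs = t ++ d := (List.takeWhile_append_dropWhile).symm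
      have hcount_v : List.count v (v :: xs) = t.length + 1 := by
        rw [List.count_cons_self]
        conv_lhs => rw [hxs_decomp]
        rw [List.count_append, List.count_eq_zero.2 hvnotin]
        conv_lhs => rw [hrun_rep]
        rw [List.count_replicate_self]
      have hcount_rest : ∀ x ∈ d, List.count x (v :: xs) = List.count x d := by
        intro x hx
        have hxv : x ≠ v := fun h => absurd (hlt x hx) (by simp [h])
        conv_lhs => rw [hxs_decomp]
        rw [show (v :: (t ++ d)) = (v :: t) ++ d from rfl, List.count_append]
        have hzero : List.count x (v :: t) = 0 := by
          rw [List.count_eq_zero]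
          intro hmem
          rcases List.mem_cons.1 hmem with h | h
          · exact hxv h
          · exact hxv (hrun_all x h)
        rw [hzero]
        simp
      have hrest_pw : d.Pairwise (· ≤ ·) := hxs_pw.sublist (List.dropWhile_sublist _)
      have hrest_len : d.length ≤ n := by
        have h1 := List.length_dropWhile_le (fun x => x == v) xs
        have h2 : xs.length + 1 ≤ n + 1 := by simpa using hlen
        rw [hd]
        omega
      have hp_rest : ∀ x ∈ d, p x = decide (List.count x d % 2 ≠ 0) := by
        intro x hx
        have hxmem : x ∈ xs := (hd ▸ List.dropWhile_sublist (l := xs) (p := (· == v))).subset hx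
        rw [hp x (.tail _ hxmem), hcount_rest x hx]
      have hIH := ih d hrest_len hrest_pw hp_rest
      have hpv : p v = decide ((t.length + 1) % 2 ≠ 0) := by
        rw [hp v (.head _), hcount_v]
      have hfilter : (v :: xs).filter p
          = (if p v then v :: t else []) ++ d.filter p := by
        conv_lhs => rw [hxs_decomp]
        rw [show (v :: (t ++ d)) = (v :: t) ++ d from rfl, List.filter_append]
        congr 1
        by_cases h : p v = true
        · rw [if_pos h, List.filter_cons_of_pos h,
            List.filter_eq_self.2 (fun a ha => by rw [hrun_all a ha]; exact h)]
        · rw [if_neg h, List.filter_cons_of_neg h,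
            List.filter_eq_nil_iff.2 (fun a ha => by rw [hrun_all a ha]; exact h)]
      rw [hfilter, hIH]
      by_cases hodd : (t.length + 1) % 2 = 1
      · rw [if_pos hodd]
        have hpvt : p v = true := by rw [hpv]; simp; omega
        rw [if_pos hpvt]
      · rw [if_neg hodd]
        have hpvf : p v = false := by rw [hpv]; simp; omega
        rw [if_neg (by simp [hpvf])]
        simp


theorem pv_ports_eq (i : Int) (q : Int) (stepeni_alfa : List (List Int)) :
    pravilo_slozenis i q stepeni_alfa = pravilo_slozenis_alt i q stepeni_alfa := by
  unfold pravilo_slozenis pravilo_slozenis_alt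
  split_ifs with h1 h2
  · rfl
  · rfl
  · simp only
    set last := PySem.List.pyGetD stepeni_alfa (-1) [] with hlast
    -- the two builders produce the same stepen_tek
    rw [PySem.List.foldl_pyRange_zero_pyGetD' last 0
      (fun st x => if x + 1 = q then st ++ [0, 1] else st ++ [x + 1]) []]
    set t := last.foldl (fun st x => if x + 1 = q then st ++ [0, 1] else st ++ [x + 1]) [] with htdef
    -- A's second loop is a filter
    rw [PySem.List.foldl_append_ite_eq_filter]
    set p : Int → Bool := fun j => decide (PySem.List.count t j % 2 ≠ 0) with hpdef
    have hperm := PySem.List.sorted_perm t (fun x => x) false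
    have hpw : (PySem.List.sorted t (fun x => x) false).Pairwise (· ≤ ·) := by
      have := PySem.List.sorted_pairwise t (fun x => x)
      simpa using this
    rw [(pvRuns_eq_filter_aux p (PySem.List.sorted t (fun x => x) false).length
      (PySem.List.sorted t (fun x => x) false) le_rfl hpw ?_)]
    · -- sorted (t.filter p) = (sorted t).filter p
      apply PySem.List.sorted_id_eq_of_perm_of_pairwise
      · simpa using hperm.filter p
      · exact hpw.filter p
    · intro x _
      rw [hpdef]
      simp only [PySem.List.count_eq]
      rw [hperm.count_eq]
      rfl

-- ===== VERDICT (by name: the statement is the Claim_ definition above) =====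
theorem pravilo_slozenis_spec : Claim_equal_pravilo_slozenis := by
  intro i q stepeni_alfa _ _
  unfold Spec_pravilo_slozenis
  exact pv_ports_eq i q stepeni_alfa
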